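-- pv_equiv track=rewrite | github.com/elliotnor/TDDE23-Labs | lab4/lab4a.py | split_rec
-- ===== SOURCE A (Python) =====
-- def split_rec(string):
--     """The function returns a tuple.
--     On the left, all lower case letters, underscores and dots are placed.
--     On the right upper case letters, spaces and horizontal lines are saved"""
--
--     if string=="": #If empty, return an empty tuple
--         return ('','')
--
--     else:
--
--         underline = string[0] == '_'
--         dot = string[0] =='.'
--         space = string[0] ==" "
--         pipes = string[0] == "|"
--
--         if string[0].islower() or underline or dot:
--
--             split_first = string[0]
--
--             split_1,split_2 = split_rec(string[1:])#Save similar charachters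
--
--             return ((split_first + split_1), split_2) #Save str in the left tuple
--
--         elif string[0].isupper() or space or pipes:
--
--             split_second = string[0]
--
--             (split_1,split_2) = split_rec(string[1:])#Save similar charachters
--
--             return (split_1, (split_second + split_2)) #Save str in the right tuple
--
--         else:
--             return split_rec(string[1:]) #Continue to check!
-- ===== SOURCE B (Python) =====
-- def split_rec(string):
--     """Two independent filter passes: lower/_/. go left, upper/space/| go right."""
--     left = ''.join(c for c in string if c.islower() or c in '_.')
--     right = ''.join(c for c in string if c.isupper() or c in ' |')
--     return (left, right)
-- ===== Notes on version B (the rewrite author's own statement) =====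
-- stated objective: simpler
-- what changed: Replaces the per-character recursive classification (one pass building both halves through recursive tuple destructuring with an empty-string base case) by two independent filtering passes, one per bucket, with no special case.
import Mathlib
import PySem

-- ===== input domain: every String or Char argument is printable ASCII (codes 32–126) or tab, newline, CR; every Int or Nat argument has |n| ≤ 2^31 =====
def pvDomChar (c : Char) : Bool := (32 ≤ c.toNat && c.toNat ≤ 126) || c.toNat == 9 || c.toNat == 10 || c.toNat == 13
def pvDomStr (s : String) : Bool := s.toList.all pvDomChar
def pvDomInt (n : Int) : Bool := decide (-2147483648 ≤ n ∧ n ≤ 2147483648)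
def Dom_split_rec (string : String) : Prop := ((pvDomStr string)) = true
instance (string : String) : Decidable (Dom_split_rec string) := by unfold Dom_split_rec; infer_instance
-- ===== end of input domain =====

-- B replaces A's single recursive classifying pass by two independent filter passes (simpler; no empty-string special case).

-- ===== PORT A =====
-- literal transliteration of A's per-character recursion, over the char list
def splitRecListA : List Char → List Char × List Char
  | [] => ([], [])
  | c :: rest =>
    if PySem.Chars.islower c || c == '_' || c == '.' then
      let p := splitRecListA rest
      (c :: p.1, p.2)
    else if PySem.Chars.isupper c || c == ' ' || c == '|' then
      let p := splitRecListA rest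
      (p.1, c :: p.2)
    else
      splitRecListA rest

def split_rec (string : String) : String × String :=
  let p := splitRecListA string.toList
  (String.ofList p.1, String.ofList p.2)

-- ===== PORT B =====
def leftPred (c : Char) : Bool := PySem.Chars.islower c || c == '_' || c == '.'
def rightPred (c : Char) : Bool := PySem.Chars.isupper c || c == ' ' || c == '|'

def split_rec_alt (string : String) : String × String :=
  (String.ofList (string.toList.filter leftPred), String.ofList (string.toList.filter rightPred))

-- ===== PRECONDITION & SPEC =====
def Spec_split_rec (string : String) (out : String × String) : Prop := out = split_rec_alt string
instance (string : String) (out : String × String) : Decidable (Spec_split_rec string out) := by unfold Spec_split_rec; infer_instance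

-- ===== CLAIM (what is proved, stated in full; the proofs are below) =====
def Claim_equal_split_rec : Prop := ∀ (string : String), Dom_split_rec string → Spec_split_rec string (split_rec string)

-- ===== LEMMAS AND PROOFS =====

theorem left_right_disjoint (c : Char) (h : leftPred c = true) : rightPred c = false := by
  simp only [leftPred, rightPred, PySem.Chars.islower, PySem.Chars.isupper,
    Bool.or_eq_true, Bool.and_eq_true, decide_eq_true_eq, beq_iff_eq] at h ⊢
  rcases h with (⟨h1, h2⟩ | rfl) | rfl
  · have hz : ¬ (c ≤ 'Z') := fun hc => absurd (le_trans h1 hc) (by decide)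
    have hs : c ≠ ' ' := fun e => absurd h1 (by rw [e]; decide)
    have hp : c ≠ '|' := fun e => absurd h2 (by rw [e]; decide)
    simp [hz, hs, hp]
  · decide
  · decide

theorem splitRecListA_eq_filter (cs : List Char) :
    splitRecListA cs = (cs.filter leftPred, cs.filter rightPred) := by
  induction cs with
  | nil => rfl
  | cons c rest ih =>
    by_cases hL : leftPred c = true
    · have hR := left_right_disjoint c hL
      simp only [splitRecListA, leftPred, Bool.or_eq_true] at hL ⊢
      rw [if_pos (by simpa [Bool.or_eq_true] using hL)]
      simp [ih, List.filter, show leftPred c = true by simpa [leftPred, Bool.or_eq_true] using hL, hR]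
    · by_cases hRt : rightPred c = true
      · simp only [splitRecListA]
        rw [if_neg (by simpa [leftPred, Bool.or_eq_true] using hL),
            if_pos (by simpa [rightPred, Bool.or_eq_true] using hRt)]
        simp [ih, List.filter, hRt, show leftPred c = false from Bool.eq_false_iff.mpr hL]
      · simp only [splitRecListA]
        rw [if_neg (by simpa [leftPred, Bool.or_eq_true] using hL),
            if_neg (by simpa [rightPred, Bool.or_eq_true] using hRt)]
        simp [ih, List.filter, show leftPred c = false from Bool.eq_false_iff.mpr hL,
          show rightPred c = false from Bool.eq_false_iff.mpr hRt]

-- ===== VERDICT (by name: the statement is the Claim_ definition above) =====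
theorem split_rec_spec : Claim_equal_split_rec := by
  intro s _
  unfold Spec_split_rec split_rec split_rec_alt
  rw [splitRecListA_eq_filter]
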